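-- pv_equiv track=rewrite | github.com/Crispy-xt/lib-for-pku-courses | 计算概论（B）/代码/The drunk jailer.py | opened
-- ===== SOURCE A (Python) =====
-- def opened(n):
--     lst=[0]*(n+1)
--     open_door=0
--     for i in range(1,n+1):
--         for j in range(1,n+1):
--             if j%i==0:
--                 lst[j]+=1
--     for ele in lst:
--         if ele%2==1:
--             open_door+=1
--     return (open_door)
-- ===== SOURCE B (Python) =====
-- def opened(n):
--     open_door = 0
--     for m in range(1, n + 1):
--         if m * m <= n:
--             open_door += 1
--     return open_door
-- ===== Notes on version B (the rewrite author's own statement) =====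
-- stated objective: faster
-- what changed: Replaces the O(n^2) nested divisor-marking loops and the toggle array by a single pass that counts the integers m in [1,n] with m*m <= n (a door ends open iff its number is a perfect square, and the perfect squares in [1,n] are exactly m^2 for such m).
import Mathlib
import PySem

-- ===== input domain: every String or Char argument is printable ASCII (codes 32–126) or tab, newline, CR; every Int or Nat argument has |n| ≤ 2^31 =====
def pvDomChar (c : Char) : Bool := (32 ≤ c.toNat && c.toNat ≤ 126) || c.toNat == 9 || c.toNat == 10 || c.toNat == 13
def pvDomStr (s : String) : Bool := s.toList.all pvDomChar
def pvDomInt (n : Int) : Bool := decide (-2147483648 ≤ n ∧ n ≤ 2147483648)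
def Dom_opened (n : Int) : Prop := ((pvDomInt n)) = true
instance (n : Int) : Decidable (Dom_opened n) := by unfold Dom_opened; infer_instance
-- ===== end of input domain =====

-- B replaces A's O(n^2) nested divisor-marking loops by one pass counting the m in [1,n] with m*m <= n (faster).

-- ===== PORT A =====
-- body of A's inner 'if j%i==0: lst[j]+=1'
def openedStep (i : Int) (lst : List Int) (j : Int) : List Int :=
  if PySem.Int.mod j i = 0 then
    PySem.List.pySetD lst j (PySem.List.pyGetD lst j 0 + 1)
  else lst

-- A's inner 'for j in range(1, n+1)' loop
def openedInner (n : Int) (lst : List Int) (i : Int) : List Int :=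
  (PySem.List.pyRange 1 (n + 1) 1).foldl (openedStep i) lst

def opened (n : Int) : Int :=
  ((PySem.List.pyRange 1 (n + 1) 1).foldl (openedInner n)
      (List.replicate (n + 1).toNat 0)).foldl
    (fun acc ele => if PySem.Int.mod ele 2 = 1 then acc + 1 else acc) 0

-- ===== PORT B =====
def opened_alt (n : Int) : Int :=
  (PySem.List.pyRange 1 (n + 1) 1).foldl (fun acc m => if m * m ≤ n then acc + 1 else acc) 0

-- ===== PRECONDITION & SPEC =====
def Spec_opened (n : Int) (out : Int) : Prop := out = opened_alt n
instance (n : Int) (out : Int) : Decidable (Spec_opened n out) := by unfold Spec_opened; infer_instance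

-- ===== CLAIM (what is proved, stated in full; the proofs are below) =====
def Claim_equal_opened : Prop := ∀ (n : Int), Dom_opened n → Spec_opened n (opened n)

-- ===== LEMMAS AND PROOFS =====

theorem tau_swap (p : ℕ) (hp : 0 < p) :
    ((p.divisors.filter (fun d => d * d < p))).card
      = ((p.divisors.filter (fun d => p < d * d))).card := by
  apply Finset.card_nbij' (fun d => p / d) (fun d => p / d)
  · intro d hd
    simp only [Finset.coe_filter, Set.mem_setOf_eq, Nat.mem_divisors] at *
    obtain ⟨⟨⟨e, rfl⟩, hne⟩, hlt⟩ := hd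
    have hd0 : 0 < d := Nat.pos_of_ne_zero (by rintro rfl; simp at hne)
    have he0 : 0 < e := Nat.pos_of_ne_zero (by rintro rfl; simp at hne)
    have he : d * e / d = e := Nat.mul_div_cancel_left e hd0
    have hde : d < e := (Nat.mul_lt_mul_left hd0).mp hlt
    exact ⟨⟨by rw [he]; exact dvd_mul_left e d, hne⟩, by rw [he]; exact (Nat.mul_lt_mul_right he0).mpr hde⟩
  · intro d hd
    simp only [Finset.coe_filter, Set.mem_setOf_eq, Nat.mem_divisors] at *
    obtain ⟨⟨⟨e, rfl⟩, hne⟩, hlt⟩ := hd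
    have hd0 : 0 < d := Nat.pos_of_ne_zero (by rintro rfl; simp at hne)
    have he0 : 0 < e := Nat.pos_of_ne_zero (by rintro rfl; simp at hne)
    have he : d * e / d = e := Nat.mul_div_cancel_left e hd0
    have hde : e < d := (Nat.mul_lt_mul_left hd0).mp hlt
    exact ⟨⟨by rw [he]; exact dvd_mul_left e d, hne⟩, by rw [he]; exact (Nat.mul_lt_mul_right he0).mpr hde⟩
  · intro d hd
    simp only [Finset.coe_filter, Set.mem_setOf_eq, Nat.mem_divisors] at hd
    exact Nat.div_div_self hd.1.1 hd.1.2
  · intro d hd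
    simp only [Finset.coe_filter, Set.mem_setOf_eq, Nat.mem_divisors] at hd
    exact Nat.div_div_self hd.1.1 hd.1.2

theorem tau_sq_card (p : ℕ) (hp : 0 < p) :
    ((p.divisors.filter (fun d => d * d = p))).card
      = (if Nat.sqrt p * Nat.sqrt p = p then 1 else 0) := by
  split_ifs with hs
  · rw [Finset.card_eq_one]
    refine ⟨Nat.sqrt p, ?_⟩
    ext d
    simp only [Finset.mem_filter, Nat.mem_divisors, Finset.mem_singleton]
    constructor
    · rintro ⟨-, hdd⟩
      exact Nat.mul_self_inj.mp (hdd.trans hs.symm)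
    · rintro rfl
      exact ⟨⟨⟨Nat.sqrt p, hs.symm⟩, hp.ne'⟩, hs⟩
  · rw [Finset.card_eq_zero]
    ext d
    simp only [Finset.mem_filter, Nat.mem_divisors, Finset.notMem_empty, iff_false]
    rintro ⟨-, hdd⟩
    exact hs (by rw [← hdd, Nat.sqrt_eq])

theorem odd_tau_iff (p : ℕ) (hp : 0 < p) :
    p.divisors.card % 2 = 1 ↔ Nat.sqrt p * Nat.sqrt p = p := by
  have h1 := Finset.card_filter_add_card_filter_not (s := p.divisors) (fun d => d * d < p)
  have h2 := Finset.card_filter_add_card_filter_not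
      (s := p.divisors.filter (fun d => ¬ d * d < p)) (fun d => d * d = p)
  rw [Finset.filter_filter, Finset.filter_filter] at h2
  have e1 : (p.divisors.filter (fun d => ¬ d * d < p ∧ d * d = p))
      = p.divisors.filter (fun d => d * d = p) := by
    apply Finset.filter_congr; intro d _; constructor <;> intro h <;> [exact h.2; exact ⟨by omega, h⟩]
  have e2 : (p.divisors.filter (fun d => ¬ d * d < p ∧ ¬ d * d = p))
      = p.divisors.filter (fun d => p < d * d) := by
    apply Finset.filter_congr; intro d _; constructor <;> intro h
    · omega
    · exact ⟨by omega, by omega⟩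
  rw [e1, e2] at h2
  have h3 := tau_swap p hp
  have h4 := tau_sq_card p hp
  split_ifs at h4 with hs <;> simp [hs] <;> omega

theorem card_squares (N : ℕ) :
    ((Finset.Icc 1 N).filter (fun p => Nat.sqrt p * Nat.sqrt p = p)).card = Nat.sqrt N := by
  have : ((Finset.Icc 1 (Nat.sqrt N)).card) = ((Finset.Icc 1 N).filter (fun p => Nat.sqrt p * Nat.sqrt p = p)).card := by
    apply Finset.card_nbij' (fun m => m * m) (fun p => Nat.sqrt p)
    · intro m hm
      simp only [Finset.coe_Icc, Set.mem_Icc, Finset.coe_filter, Set.mem_setOf_eq,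
        Finset.mem_Icc] at *
      refine ⟨⟨by nlinarith [hm.1], ?_⟩, by rw [Nat.sqrt_eq]⟩
      calc m * m ≤ Nat.sqrt N * Nat.sqrt N := Nat.mul_le_mul hm.2 hm.2
      _ ≤ N := by have := Nat.sqrt_le' N; nlinarith [Nat.sqrt_le' N]
    · intro p hp
      simp only [Finset.coe_Icc, Set.mem_Icc, Finset.coe_filter, Set.mem_setOf_eq,
        Finset.mem_Icc] at *
      obtain ⟨⟨h1, h2⟩, hs⟩ := hp
      constructor
      · rcases Nat.eq_zero_or_pos (Nat.sqrt p) with h | h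
        · rw [h] at hs; omega
        · omega
      · exact Nat.sqrt_le_sqrt h2
    · intro m hm
      simp only [Finset.coe_Icc, Set.mem_Icc] at hm
      exact Nat.sqrt_eq m
    · intro p hp
      simp only [Finset.coe_filter, Set.mem_setOf_eq] at hp
      exact hp.2
  rw [← this, Nat.card_Icc]; omega

theorem countP_range_lt (N s : ℕ) : (List.range N).countP (fun k => decide (k < s)) = min s N := by
  induction N with
  | zero => simp
  | succ N ih =>
    rw [List.range_succ, List.countP_append, ih]
    by_cases h : N < s <;> simp [h] <;> omega

theorem opened_alt_eq (n : Int) : opened_alt n = (Nat.sqrt n.toNat : Int) := by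
  unfold opened_alt
  have hf : (fun (acc : Int) (m : Int) => if m * m ≤ n then acc + 1 else acc)
      = fun acc m => if (fun m : Int => decide (m * m ≤ n)) m = true then acc + 1 else acc := by
    funext acc m; simp
  rw [hf, PySem.List.foldl_count_if, PySem.List.pyRange_one, List.countP_map]
  have h1 : (n + 1 - 1).toNat = n.toNat := by omega
  rw [h1]
  have h2 : ∀ k ∈ List.range n.toNat,
      (((fun m : Int => decide (m * m ≤ n)) ∘ fun k : ℕ => (1 : Int) + k) k = true
        ↔ (fun k : ℕ => decide (k < Nat.sqrt n.toNat)) k = true) := by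
    intro k hk
    rw [List.mem_range] at hk
    have hn0 : 0 ≤ n := by omega
    have hcast : ((n.toNat : ℤ)) = n := Int.toNat_of_nonneg hn0
    have hiff : ((1 : Int) + k) * ((1 : Int) + k) ≤ n ↔ (1 + k) * (1 + k) ≤ n.toNat := by
      constructor <;> intro h
      · rw [← hcast] at h; exact_mod_cast h
      · rw [← hcast]; exact_mod_cast h
    have hiff2 : ((1 : Int) + k) * ((1 : Int) + k) ≤ n ↔ k < Nat.sqrt n.toNat := by
      rw [hiff]
      rw [show (1 + k) * (1 + k) = (k + 1) * (k + 1) by ring, ← Nat.le_sqrt]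
      omega
    simp [hiff2]
  rw [List.countP_congr h2, countP_range_lt]
  have := Nat.sqrt_le_self n.toNat
  simp [Nat.min_eq_left this]

theorem openedStep_length (i : Int) (lst : List Int) (j : Int) :
    (openedStep i lst j).length = lst.length := by
  unfold openedStep
  split
  · exact PySem.List.length_pySetD lst j _
  · rfl

theorem foldl_openedStep_length (i : Int) (js : List Int) (lst : List Int) :
    (js.foldl (openedStep i) lst).length = lst.length := by
  induction js generalizing lst with
  | nil => rfl
  | cons j js ih => rw [List.foldl_cons, ih, openedStep_length]

theorem inner_getD (n i : Int) (k : ℕ) :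
    ∀ (a : Int) (lst : List Int) (p : ℕ), (n + 1 - a).toNat = k →
      (lst.length : Int) = n + 1 → 1 ≤ a →
      ((PySem.List.pyRange a (n + 1) 1).foldl (openedStep i) lst).getD p 0
        = lst.getD p 0 + (if a ≤ (p : Int) ∧ (p : Int) ≤ n ∧ i ∣ (p : Int) then 1 else 0) := by
  induction k with
  | zero =>
    intro a lst p hk hl ha
    rw [PySem.List.pyRange_one_eq_nil (by omega)]
    have : ¬ (a ≤ (p : Int) ∧ (p : Int) ≤ n ∧ i ∣ (p : Int)) := by
      rintro ⟨h1, h2, -⟩; omega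
    simp [this]
  | succ k ih =>
    intro a lst p hk hl ha
    have hab : a < n + 1 := by omega
    rw [PySem.List.pyRange_one_cons hab, List.foldl_cons]
    rw [ih (a + 1) (openedStep i lst a) p (by omega)
      (by rw [openedStep_length]; exact hl) (by omega)]
    have ha0 : 0 ≤ a := by omega
    have haN : a.toNat < lst.length := by omega
    unfold openedStep
    simp only [PySem.Int.mod_eq_zero_iff_dvd]
    by_cases hdvd : i ∣ a
    · rw [if_pos hdvd, PySem.List.pySetD_of_nonneg _ _ ha0]
      rw [PySem.List.pyGetD_eq_getElem _ _ ha0 (by omega)]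
      by_cases hpa : (p : Int) = a
      · have hpa' : p = a.toNat := by omega
        rw [hpa']
        rw [List.getD_eq_getElem _ _ (by simpa using haN),
            List.getElem_set_self,
            List.getD_eq_getElem _ _ (by omega)]
        have c1 : ¬ (a + 1 ≤ (a.toNat : Int) ∧ ((a.toNat : Int)) ≤ n ∧ i ∣ ((a.toNat : Int))) := by
          rintro ⟨h1, -, -⟩; omega
        have c2 : (a ≤ ((a.toNat : Int)) ∧ ((a.toNat : Int)) ≤ n ∧ i ∣ ((a.toNat : Int))) := by
          refine ⟨by omega, by omega, ?_⟩
          have : ((a.toNat : Int)) = a := by omega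
          rw [this]; exact hdvd
        rw [if_neg c1, if_pos c2]
        ring
      · have hset : (lst.set a.toNat (lst[a.toNat] + 1)).getD p 0 = lst.getD p 0 := by
          rcases Nat.lt_or_ge p lst.length with hp | hp
          · rw [List.getD_eq_getElem _ _ (by simpa using hp),
                List.getElem_set_ne (by omega), List.getD_eq_getElem _ _ hp]
          · rw [List.getD_eq_default _ _ (by simpa using hp), List.getD_eq_default _ _ hp]
        rw [hset]
        congr 1
        have : (a + 1 ≤ (p : Int) ∧ (p : Int) ≤ n ∧ i ∣ (p : Int))
            ↔ (a ≤ (p : Int) ∧ (p : Int) ≤ n ∧ i ∣ (p : Int)) := by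
          constructor <;> rintro ⟨h1, h2, h3⟩ <;> exact ⟨by omega, h2, h3⟩
        rw [if_congr this rfl rfl]
    · rw [if_neg hdvd]
      congr 1
      have : (a + 1 ≤ (p : Int) ∧ (p : Int) ≤ n ∧ i ∣ (p : Int))
          ↔ (a ≤ (p : Int) ∧ (p : Int) ≤ n ∧ i ∣ (p : Int)) := by
        constructor <;> rintro ⟨h1, h2, h3⟩
        · exact ⟨by omega, h2, h3⟩
        · refine ⟨?_, h2, h3⟩
          rcases eq_or_lt_of_le h1 with h | h
          · exfalso; apply hdvd; rw [h]; exact h3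
          · omega
      rw [if_congr this rfl rfl]

theorem openedInner_length (n : Int) (lst : List Int) (i : Int) :
    (openedInner n lst i).length = lst.length := by
  unfold openedInner; exact foldl_openedStep_length ..

theorem outer_getD (n : Int) (k : ℕ) :
    ∀ (b : Int) (lst : List Int) (p : ℕ), (n + 1 - b).toNat = k →
      (lst.length : Int) = n + 1 → 1 ≤ b →
      ((PySem.List.pyRange b (n + 1) 1).foldl (openedInner n) lst).getD p 0
        = lst.getD p 0 +
          ((PySem.List.pyRange b (n + 1) 1).countP
            (fun i => decide ((1 : Int) ≤ (p : Int) ∧ (p : Int) ≤ n ∧ i ∣ (p : Int))) : Int) := by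
  induction k with
  | zero =>
    intro b lst p hk hl hb
    rw [PySem.List.pyRange_one_eq_nil (by omega)]
    simp
  | succ k ih =>
    intro b lst p hk hl hb
    have hab : b < n + 1 := by omega
    rw [PySem.List.pyRange_one_cons hab, List.foldl_cons, List.countP_cons]
    rw [ih (b + 1) (openedInner n lst b) p (by omega)
      (by rw [openedInner_length]; exact hl) (by omega)]
    rw [show openedInner n lst b = (PySem.List.pyRange 1 (n + 1) 1).foldl (openedStep b) lst from rfl]
    rw [inner_getD n b (n + 1 - 1).toNat 1 lst p (by omega) hl (by omega)]
    by_cases hc : (1 : Int) ≤ (p : Int) ∧ (p : Int) ≤ n ∧ b ∣ (p : Int)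
    · rw [if_pos hc]
      simp [hc]
      omega
    · rw [if_neg hc]
      simp
      intro h1 h2 h3
      push_cast at hc
      exact hc ⟨by exact_mod_cast h1, h2, h3⟩

def divCnt (n : Int) (p : ℕ) : ℕ :=
  (PySem.List.pyRange 1 (n + 1) 1).countP
    (fun i => decide ((1 : Int) ≤ (p : Int) ∧ (p : Int) ≤ n ∧ i ∣ (p : Int)))

theorem countP_filter_range (N : ℕ) (q : ℕ → Prop) [DecidablePred q] :
    ((Finset.range N).filter q).card = (List.range N).countP (fun k => decide (q k)) := by
  simp [Finset.range, Finset.filter, Finset.card, Multiset.range, List.countP_eq_length_filter]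

theorem divCnt_zero (n : Int) : divCnt n 0 = 0 := by
  unfold divCnt
  simp

theorem divCnt_tau (n : Int) (p : ℕ) (h1 : 1 ≤ p) (h2 : (p : Int) ≤ n) :
    divCnt n p = p.divisors.card := by
  have hp0 : 0 < p := h1
  unfold divCnt
  rw [PySem.List.pyRange_one, List.countP_map]
  have hcg : ∀ k ∈ List.range (n + 1 - 1).toNat,
      (((fun i => decide ((1 : Int) ≤ (p : Int) ∧ (p : Int) ≤ n ∧ i ∣ (p : Int)))
          ∘ fun k : ℕ => (1 : Int) + k) k = true
        ↔ (fun k : ℕ => decide ((1 + k) ∣ p)) k = true) := by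
    intro k hk
    simp only [Function.comp_apply, decide_eq_true_eq]
    have : ((1 : Int) + k) ∣ (p : Int) ↔ (1 + k) ∣ p := by
      constructor <;> intro h
      · exact_mod_cast h
      · exact_mod_cast h
    rw [this]
    constructor
    · rintro ⟨-, -, h⟩; exact h
    · intro h; exact ⟨by exact_mod_cast h1, h2, h⟩
  rw [List.countP_congr hcg]
  rw [← countP_filter_range]
  apply Finset.card_nbij (fun k => 1 + k)
  · intro k hk
    simp only [Finset.coe_filter, Finset.mem_range, Set.mem_setOf_eq] at hk
    simp only [Finset.mem_coe, Nat.mem_divisors]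
    exact ⟨hk.2, hp0.ne'⟩
  · intro a ha b hb hab
    simp only at hab
    omega
  · intro d hd
    simp only [Finset.mem_coe, Nat.mem_divisors] at hd
    simp only [Set.mem_image, Finset.mem_coe, Finset.mem_filter, Finset.mem_range]
    have hd1 : 1 ≤ d := Nat.pos_of_ne_zero (by rintro rfl; exact hp0.ne' (Nat.eq_zero_of_zero_dvd hd.1))
    have hdp : d ≤ p := Nat.le_of_dvd hp0 hd.1
    have hpn : p ≤ (n + 1 - 1).toNat := by omega
    exact ⟨d - 1, ⟨by omega, by rw [show 1 + (d - 1) = d by omega]; exact hd.1⟩, by omega⟩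

theorem foldl_openedInner_length (n : Int) (is : List Int) (lst : List Int) :
    (is.foldl (openedInner n) lst).length = lst.length := by
  induction is generalizing lst with
  | nil => rfl
  | cons i is ih => rw [List.foldl_cons, ih, openedInner_length]

theorem opened_eq (n : Int) (hn : 0 ≤ n) :
    opened n = (((Finset.Icc 1 n.toNat).filter (fun p => Nat.sqrt p * Nat.sqrt p = p)).card : Int) := by
  unfold opened
  set L := (n + 1).toNat with hL
  set lst0 : List Int := List.replicate L 0 with hlst0
  set lst1 := (PySem.List.pyRange 1 (n + 1) 1).foldl (openedInner n) lst0 with hlst1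
  have hlen : lst1.length = L := by
    rw [hlst1, foldl_openedInner_length]; simp [hlst0]
  have hl0 : ((lst0.length : Int)) = n + 1 := by
    simp [hlst0]; omega
  have hpt : ∀ p : ℕ, lst1.getD p 0 = (divCnt n p : Int) := by
    intro p
    rw [hlst1, outer_getD n (n + 1 - 1).toNat 1 lst0 p (by omega) hl0 le_rfl]
    have h0 : lst0.getD p 0 = 0 := by
      rcases Nat.lt_or_ge p lst0.length with hp | hp
      · rw [List.getD_eq_getElem _ _ hp]; simp [hlst0]
      · rw [List.getD_eq_default _ _ hp]
    rw [h0, divCnt]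
    simp
  have hcnt : (fun (acc : Int) (ele : Int) => if PySem.Int.mod ele 2 = 1 then acc + 1 else acc)
      = fun acc ele => if (fun ele : Int => decide (PySem.Int.mod ele 2 = 1)) ele = true
          then acc + 1 else acc := by
    funext acc ele; simp
  rw [hcnt, PySem.List.foldl_count_if]
  have hmap : lst1 = (List.range L).map (fun p => (divCnt n p : Int)) := by
    apply List.ext_getElem (by simp [hlen])
    intro p h1 h2
    rw [← List.getD_eq_getElem lst1 0 h1, hpt p]
    simp
  rw [hmap, List.countP_map]
  have hcg : ∀ p ∈ List.range L,
      (((fun ele : Int => decide (PySem.Int.mod ele 2 = 1)) ∘ fun p : ℕ => ((divCnt n p : ℕ) : Int)) p = true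
        ↔ (fun p : ℕ => decide (divCnt n p % 2 = 1)) p = true) := by
    intro p hp
    simp only [Function.comp_apply, decide_eq_true_eq]
    rw [PySem.Int.mod_eq_emod_of_pos (by norm_num)]
    constructor <;> intro h
    · exact_mod_cast h
    · exact_mod_cast h
  rw [List.countP_congr hcg, ← countP_filter_range]
  have hset : (Finset.range L).filter (fun p => divCnt n p % 2 = 1)
      = (Finset.Icc 1 n.toNat).filter (fun p => Nat.sqrt p * Nat.sqrt p = p) := by
    ext p
    simp only [Finset.mem_filter, Finset.mem_range, Finset.mem_Icc]
    constructor
    · rintro ⟨hpL, hodd⟩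
      have hp1 : 1 ≤ p := by
        rcases Nat.eq_zero_or_pos p with rfl | h
        · rw [divCnt_zero] at hodd; omega
        · exact h
      have hpn : p ≤ n.toNat := by omega
      rw [divCnt_tau n p hp1 (by omega)] at hodd
      exact ⟨⟨hp1, hpn⟩, (odd_tau_iff p hp1).mp hodd⟩
    · rintro ⟨⟨hp1, hpn⟩, hsq⟩
      refine ⟨by omega, ?_⟩
      rw [divCnt_tau n p hp1 (by omega)]
      exact (odd_tau_iff p hp1).mpr hsq
  rw [hset]
  simp

-- ===== VERDICT (by name: the statement is the Claim_ definition above) =====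
theorem opened_spec : Claim_equal_opened := by
  unfold Claim_equal_opened Spec_opened
  intro n _
  by_cases hn : 0 ≤ n
  · rw [opened_eq n hn, opened_alt_eq, card_squares]
  · have h1 : PySem.List.pyRange 1 (n + 1) 1 = [] := PySem.List.pyRange_one_eq_nil (by omega)
    have h2 : (n + 1).toNat = 0 := by omega
    unfold opened opened_alt
    rw [h1, h2]
    simp
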